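-- pv_equiv track=rewrite | github.com/KcRobin9/MM1-Map-Editor | Finished Cities/MORONVILLE_june2023.py | sort_coordinates
-- ===== SOURCE A (Python) =====
-- def sort_coordinates(vertex_coordinates):
--     max_x_coord = max(vertex_coordinates, key=lambda coord: coord[0])
--     min_x_coord = min(vertex_coordinates, key=lambda coord: coord[0])
--     max_z_for_max_x = max([coord for coord in vertex_coordinates if coord[0] == max_x_coord[0]], key=lambda coord: coord[2])
--     min_z_for_max_x = min([coord for coord in vertex_coordinates if coord[0] == max_x_coord[0]], key=lambda coord: coord[2])
--     max_z_for_min_x = max([coord for coord in vertex_coordinates if coord[0] == min_x_coord[0]], key=lambda coord: coord[2])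
--     min_z_for_min_x = min([coord for coord in vertex_coordinates if coord[0] == min_x_coord[0]], key=lambda coord: coord[2])
--
--     return [max_z_for_max_x, min_z_for_max_x, min_z_for_min_x, max_z_for_min_x]
-- ===== SOURCE B (Python) =====
-- def sort_coordinates(vertex_coordinates):
--     first = vertex_coordinates[0]
--     max_x = min_x = first[0]
--     hi_max = hi_min = lo_max = lo_min = first
--     for c in vertex_coordinates[1:]:
--         x, z = c[0], c[2]
--         if x > max_x:
--             max_x = x
--             hi_max = hi_min = c
--         elif x == max_x:
--             if z > hi_max[2]:
--                 hi_max = c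
--             if z < hi_min[2]:
--                 hi_min = c
--         if x < min_x:
--             min_x = x
--             lo_max = lo_min = c
--         elif x == min_x:
--             if z > lo_max[2]:
--                 lo_max = c
--             if z < lo_min[2]:
--                 lo_min = c
--     return [hi_max, hi_min, lo_min, lo_max]
-- ===== Notes on version B (the rewrite author's own statement) =====
-- stated objective: faster
-- what changed: Replaced A's six max/min scans (two over the whole list plus four over freshly built filtered lists) by a single left-to-right pass maintaining running max-x/min-x values together with the first-seen max-z and min-z coordinate of each extreme-x group.
import Mathlib
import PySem

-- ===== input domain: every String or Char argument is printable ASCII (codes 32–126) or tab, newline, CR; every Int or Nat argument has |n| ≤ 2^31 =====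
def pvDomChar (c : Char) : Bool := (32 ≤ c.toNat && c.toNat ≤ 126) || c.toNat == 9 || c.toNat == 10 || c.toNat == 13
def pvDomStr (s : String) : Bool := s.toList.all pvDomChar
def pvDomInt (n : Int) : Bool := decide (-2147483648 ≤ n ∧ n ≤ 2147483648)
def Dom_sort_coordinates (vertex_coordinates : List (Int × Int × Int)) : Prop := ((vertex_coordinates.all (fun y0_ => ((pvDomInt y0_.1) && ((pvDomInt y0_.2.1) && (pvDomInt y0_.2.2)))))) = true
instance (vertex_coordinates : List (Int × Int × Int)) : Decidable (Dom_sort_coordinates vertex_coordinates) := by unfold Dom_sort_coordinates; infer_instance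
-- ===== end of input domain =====

-- B replaces A's six max/min scans with one running-extremes pass (measured faster by a constant factor).

-- ===== PORT A =====
def sort_coordinates (vertex_coordinates : List (Int × Int × Int)) : List (Int × Int × Int) :=
  match PySem.List.max? vertex_coordinates (fun c => c.1),
        PySem.List.min? vertex_coordinates (fun c => c.1) with
  | some max_x_coord, some min_x_coord =>
    let hiList := vertex_coordinates.filter (fun c => c.1 == max_x_coord.1)
    let loList := vertex_coordinates.filter (fun c => c.1 == min_x_coord.1)
    match PySem.List.max? hiList (fun c => c.2.2), PySem.List.min? hiList (fun c => c.2.2),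
          PySem.List.max? loList (fun c => c.2.2), PySem.List.min? loList (fun c => c.2.2) with
    | some max_z_for_max_x, some min_z_for_max_x, some max_z_for_min_x, some min_z_for_min_x =>
        [max_z_for_max_x, min_z_for_max_x, min_z_for_min_x, max_z_for_min_x]
    | _, _, _, _ => []   -- unreachable under Pre_ (Python: ValueError on empty)
  | _, _ => []           -- Python raises ValueError here (empty list); excluded by Pre_

-- ===== PORT B =====
structure SCState where
  maxx : Int
  hiMax : Int × Int × Int
  hiMin : Int × Int × Int
  minx : Int
  loMax : Int × Int × Int
  loMin : Int × Int × Int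
deriving DecidableEq, Repr

def scHiStep (s : SCState) (c : Int × Int × Int) : SCState :=
  if s.maxx < c.1 then { s with maxx := c.1, hiMax := c, hiMin := c }
  else if c.1 = s.maxx then
    { s with hiMax := if s.hiMax.2.2 < c.2.2 then c else s.hiMax,
             hiMin := if c.2.2 < s.hiMin.2.2 then c else s.hiMin }
  else s

def scLoStep (s : SCState) (c : Int × Int × Int) : SCState :=
  if c.1 < s.minx then { s with minx := c.1, loMax := c, loMin := c }
  else if c.1 = s.minx then
    { s with loMax := if s.loMax.2.2 < c.2.2 then c else s.loMax,
             loMin := if c.2.2 < s.loMin.2.2 then c else s.loMin }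
  else s

def scStep (s : SCState) (c : Int × Int × Int) : SCState := scLoStep (scHiStep s c) c

def sort_coordinates_alt (vertex_coordinates : List (Int × Int × Int)) : List (Int × Int × Int) :=
  match vertex_coordinates with
  | [] => []   -- Python B raises IndexError here; excluded by Pre_
  | first :: rest =>
    let s := rest.foldl scStep ⟨first.1, first, first, first.1, first, first⟩
    [s.hiMax, s.hiMin, s.loMin, s.loMax]

-- ===== PRECONDITION & SPEC =====
-- Python A raises ValueError on the empty list (max of empty sequence); nonemptiness is the whole precondition.
def Pre_sort_coordinates (vertex_coordinates : List (Int × Int × Int)) : Prop := vertex_coordinates ≠ []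
instance (vertex_coordinates : List (Int × Int × Int)) : Decidable (Pre_sort_coordinates vertex_coordinates) := by unfold Pre_sort_coordinates; infer_instance
def pvWitness_sort_coordinates : (List (Int × Int × Int)) := [(1, 2, 3), (1, 0, 9), (-2, 5, 4)]

def Spec_sort_coordinates (vertex_coordinates : List (Int × Int × Int)) (out : List (Int × Int × Int)) : Prop := out = sort_coordinates_alt vertex_coordinates
instance (vertex_coordinates : List (Int × Int × Int)) (out : List (Int × Int × Int)) : Decidable (Spec_sort_coordinates vertex_coordinates out) := by unfold Spec_sort_coordinates; infer_instance

-- ===== CLAIM (what is proved, stated in full; the proofs are below) =====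
def Claim_equal_sort_coordinates : Prop := ∀ (vertex_coordinates : List (Int × Int × Int)), Dom_sort_coordinates vertex_coordinates → Pre_sort_coordinates vertex_coordinates → Spec_sort_coordinates vertex_coordinates (sort_coordinates vertex_coordinates)

-- ===== LEMMAS AND PROOFS =====

theorem max?_append_one (l : List (Int × Int × Int)) (c : Int × Int × Int)
    (key : (Int × Int × Int) → Int) :
    PySem.List.max? (l ++ [c]) key =
      match PySem.List.max? l key with
      | none => some c
      | some m => if key m < key c then some c else some m := by
  cases hX : PySem.List.max? l key with
  | none =>
    obtain rfl := Iff.mp (PySem.List.max?_eq_none_iff l key) hX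
    simp [PySem.List.max?]
  | some m =>
    unfold PySem.List.max? at hX ⊢
    rw [List.foldl_append, List.foldl_cons, List.foldl_nil, hX]

theorem min?_append_one (l : List (Int × Int × Int)) (c : Int × Int × Int)
    (key : (Int × Int × Int) → Int) :
    PySem.List.min? (l ++ [c]) key =
      match PySem.List.min? l key with
      | none => some c
      | some m => if key c < key m then some c else some m := by
  cases hX : PySem.List.min? l key with
  | none =>
    obtain rfl := Iff.mp (PySem.List.min?_eq_none_iff l key) hX
    simp [PySem.List.min?]
  | some m =>
    unfold PySem.List.min? at hX ⊢
    rw [List.foldl_append, List.foldl_cons, List.foldl_nil, hX]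

@[simp] theorem scLoStep_maxx (s : SCState) (c : Int × Int × Int) : (scLoStep s c).maxx = s.maxx := by
  simp only [scLoStep]; split_ifs <;> rfl
@[simp] theorem scLoStep_hiMax (s : SCState) (c : Int × Int × Int) : (scLoStep s c).hiMax = s.hiMax := by
  simp only [scLoStep]; split_ifs <;> rfl
@[simp] theorem scLoStep_hiMin (s : SCState) (c : Int × Int × Int) : (scLoStep s c).hiMin = s.hiMin := by
  simp only [scLoStep]; split_ifs <;> rfl
@[simp] theorem scHiStep_minx (s : SCState) (c : Int × Int × Int) : (scHiStep s c).minx = s.minx := by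
  simp only [scHiStep]; split_ifs <;> rfl
@[simp] theorem scHiStep_loMax (s : SCState) (c : Int × Int × Int) : (scHiStep s c).loMax = s.loMax := by
  simp only [scHiStep]; split_ifs <;> rfl
@[simp] theorem scHiStep_loMin (s : SCState) (c : Int × Int × Int) : (scHiStep s c).loMin = s.loMin := by
  simp only [scHiStep]; split_ifs <;> rfl

@[simp] theorem scStep_maxx (s : SCState) (c : Int × Int × Int) : (scStep s c).maxx = (scHiStep s c).maxx := by
  simp [scStep]
@[simp] theorem scStep_hiMax (s : SCState) (c : Int × Int × Int) : (scStep s c).hiMax = (scHiStep s c).hiMax := by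
  simp [scStep]
@[simp] theorem scStep_hiMin (s : SCState) (c : Int × Int × Int) : (scStep s c).hiMin = (scHiStep s c).hiMin := by
  simp [scStep]
@[simp] theorem scStep_minx (s : SCState) (c : Int × Int × Int) : (scStep s c).minx = (scLoStep s c).minx := by
  simp only [scStep, scLoStep, scHiStep_minx, scHiStep_loMax, scHiStep_loMin]
  split_ifs <;> simp
@[simp] theorem scStep_loMax (s : SCState) (c : Int × Int × Int) : (scStep s c).loMax = (scLoStep s c).loMax := by
  simp only [scStep, scLoStep, scHiStep_minx, scHiStep_loMax, scHiStep_loMin]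
  split_ifs <;> simp
@[simp] theorem scStep_loMin (s : SCState) (c : Int × Int × Int) : (scStep s c).loMin = (scLoStep s c).loMin := by
  simp only [scStep, scLoStep, scHiStep_minx, scHiStep_loMax, scHiStep_loMin]
  split_ifs <;> simp

def HiInv (v : List (Int × Int × Int)) (s : SCState) : Prop :=
  (∀ y ∈ v, y.1 ≤ s.maxx) ∧
  PySem.List.max? (v.filter (fun c => c.1 == s.maxx)) (fun c => c.2.2) = some s.hiMax ∧
  PySem.List.min? (v.filter (fun c => c.1 == s.maxx)) (fun c => c.2.2) = some s.hiMin

def LoInv (v : List (Int × Int × Int)) (s : SCState) : Prop :=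
  (∀ y ∈ v, s.minx ≤ y.1) ∧
  PySem.List.max? (v.filter (fun c => c.1 == s.minx)) (fun c => c.2.2) = some s.loMax ∧
  PySem.List.min? (v.filter (fun c => c.1 == s.minx)) (fun c => c.2.2) = some s.loMin

theorem hiInv_step (v : List (Int × Int × Int)) (s : SCState) (c : Int × Int × Int)
    (h : HiInv v s) : HiInv (v ++ [c]) (scHiStep s c) := by
  obtain ⟨hb, hmx, hmn⟩ := h
  unfold HiInv
  by_cases h1 : s.maxx < c.1
  · have hstep : scHiStep s c = { s with maxx := c.1, hiMax := c, hiMin := c } := by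
      simp [scHiStep, h1]
    have hnil : v.filter (fun y => y.1 == c.1) = [] := by
      apply List.filter_eq_nil_iff.mpr
      intro y hy
      have := hb y hy
      simp only [beq_iff_eq]
      omega
    rw [hstep]
    refine ⟨?_, ?_, ?_⟩
    · intro y hy
      show y.1 ≤ c.1
      rcases List.mem_append.mp hy with hy | hy
      · exact le_of_lt (lt_of_le_of_lt (hb y hy) h1)
      · simp only [List.mem_singleton] at hy; subst hy; exact le_refl _
    · show PySem.List.max? ((v ++ [c]).filter (fun y => y.1 == c.1)) _ = some c
      rw [List.filter_append, hnil]
      simp [PySem.List.max?]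
    · show PySem.List.min? ((v ++ [c]).filter (fun y => y.1 == c.1)) _ = some c
      rw [List.filter_append, hnil]
      simp [PySem.List.min?]
  · by_cases h2 : c.1 = s.maxx
    · have hstep : scHiStep s c =
          { s with hiMax := if s.hiMax.2.2 < c.2.2 then c else s.hiMax,
                   hiMin := if c.2.2 < s.hiMin.2.2 then c else s.hiMin } := by
        simp [scHiStep, h2]
      have hcf : List.filter (fun y => y.1 == s.maxx) [c] = [c] := by simp [h2]
      rw [hstep]
      refine ⟨?_, ?_, ?_⟩
      · intro y hy
        show y.1 ≤ s.maxx
        rcases List.mem_append.mp hy with hy | hy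
        · exact hb y hy
        · simp only [List.mem_singleton] at hy; subst hy; omega
      · show PySem.List.max? ((v ++ [c]).filter (fun y => y.1 == s.maxx)) _ = _
        rw [List.filter_append, hcf, max?_append_one, hmx]
        simp only []
        split <;> simp
      · show PySem.List.min? ((v ++ [c]).filter (fun y => y.1 == s.maxx)) _ = _
        rw [List.filter_append, hcf, min?_append_one, hmn]
        simp only []
        split <;> simp
    · have hstep : scHiStep s c = s := by simp [scHiStep, h1, h2]
      have hcf : List.filter (fun y => y.1 == s.maxx) [c] = [] := by simp [h2]
      rw [hstep]
      refine ⟨?_, ?_, ?_⟩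
      · intro y hy
        rcases List.mem_append.mp hy with hy | hy
        · exact hb y hy
        · simp only [List.mem_singleton] at hy; subst hy; omega
      · rw [List.filter_append, hcf, List.append_nil, hmx]
      · rw [List.filter_append, hcf, List.append_nil, hmn]

theorem loInv_step (v : List (Int × Int × Int)) (s : SCState) (c : Int × Int × Int)
    (h : LoInv v s) : LoInv (v ++ [c]) (scLoStep s c) := by
  obtain ⟨hb, hmx, hmn⟩ := h
  unfold LoInv
  by_cases h1 : c.1 < s.minx
  · have hstep : scLoStep s c = { s with minx := c.1, loMax := c, loMin := c } := by
      simp [scLoStep, h1]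
    have hnil : v.filter (fun y => y.1 == c.1) = [] := by
      apply List.filter_eq_nil_iff.mpr
      intro y hy
      have := hb y hy
      simp only [beq_iff_eq]
      omega
    rw [hstep]
    refine ⟨?_, ?_, ?_⟩
    · intro y hy
      show c.1 ≤ y.1
      rcases List.mem_append.mp hy with hy | hy
      · exact le_of_lt (lt_of_lt_of_le h1 (hb y hy))
      · simp only [List.mem_singleton] at hy; subst hy; exact le_refl _
    · show PySem.List.max? ((v ++ [c]).filter (fun y => y.1 == c.1)) _ = some c
      rw [List.filter_append, hnil]
      simp [PySem.List.max?]
    · show PySem.List.min? ((v ++ [c]).filter (fun y => y.1 == c.1)) _ = some c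
      rw [List.filter_append, hnil]
      simp [PySem.List.min?]
  · by_cases h2 : c.1 = s.minx
    · have hstep : scLoStep s c =
          { s with loMax := if s.loMax.2.2 < c.2.2 then c else s.loMax,
                   loMin := if c.2.2 < s.loMin.2.2 then c else s.loMin } := by
        simp [scLoStep, h2]
      have hcf : List.filter (fun y => y.1 == s.minx) [c] = [c] := by simp [h2]
      rw [hstep]
      refine ⟨?_, ?_, ?_⟩
      · intro y hy
        show s.minx ≤ y.1
        rcases List.mem_append.mp hy with hy | hy
        · exact hb y hy
        · simp only [List.mem_singleton] at hy; subst hy; omega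
      · show PySem.List.max? ((v ++ [c]).filter (fun y => y.1 == s.minx)) _ = _
        rw [List.filter_append, hcf, max?_append_one, hmx]
        simp only []
        split <;> simp
      · show PySem.List.min? ((v ++ [c]).filter (fun y => y.1 == s.minx)) _ = _
        rw [List.filter_append, hcf, min?_append_one, hmn]
        simp only []
        split <;> simp
    · have hstep : scLoStep s c = s := by simp [scLoStep, h1, h2]
      have hcf : List.filter (fun y => y.1 == s.minx) [c] = [] := by simp [h2]
      rw [hstep]
      refine ⟨?_, ?_, ?_⟩
      · intro y hy
        rcases List.mem_append.mp hy with hy | hy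
        · exact hb y hy
        · simp only [List.mem_singleton] at hy; subst hy; omega
      · rw [List.filter_append, hcf, List.append_nil, hmx]
      · rw [List.filter_append, hcf, List.append_nil, hmn]

theorem sc_fold_inv (first : Int × Int × Int) (rest : List (Int × Int × Int)) :
    HiInv (first :: rest) (rest.foldl scStep ⟨first.1, first, first, first.1, first, first⟩) ∧
    LoInv (first :: rest) (rest.foldl scStep ⟨first.1, first, first, first.1, first, first⟩) := by
  induction rest using List.reverseRecOn with
  | nil =>
    refine ⟨⟨?_, ?_, ?_⟩, ⟨?_, ?_, ?_⟩⟩ <;>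
      simp [PySem.List.max?, PySem.List.min?]
  | append_singleton t c ih =>
    obtain ⟨ihHi, ihLo⟩ := ih
    rw [List.foldl_append, List.foldl_cons, List.foldl_nil]
    set s := t.foldl scStep ⟨first.1, first, first, first.1, first, first⟩ with hs
    have hHi : HiInv ((first :: t) ++ [c]) (scHiStep s c) := hiInv_step _ _ _ ihHi
    have hLo : LoInv ((first :: t) ++ [c]) (scLoStep s c) := loInv_step _ _ _ ihLo
    have hcons : first :: (t ++ [c]) = (first :: t) ++ [c] := by simp
    constructor
    · rw [hcons]
      obtain ⟨b1, b2, b3⟩ := hHi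
      refine ⟨?_, ?_, ?_⟩
      · intro y hy
        simp only [scStep_maxx]
        exact b1 y hy
      · simp only [scStep_maxx, scStep_hiMax]
        exact b2
      · simp only [scStep_maxx, scStep_hiMin]
        exact b3
    · rw [hcons]
      obtain ⟨b1, b2, b3⟩ := hLo
      refine ⟨?_, ?_, ?_⟩
      · intro y hy
        simp only [scStep_minx]
        exact b1 y hy
      · simp only [scStep_minx, scStep_loMax]
        exact b2
      · simp only [scStep_minx, scStep_loMin]
        exact b3

-- ===== VERDICT (by name: the statement is the Claim_ definition above) =====
theorem sort_coordinates_spec : Claim_equal_sort_coordinates := by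
  intro v _ hpre
  unfold Spec_sort_coordinates
  match hv : v with
  | [] => exact absurd rfl hpre
  | first :: rest =>
    obtain ⟨⟨hbHi, hmx, hmn⟩, ⟨hbLo, hlmx, hlmn⟩⟩ := sc_fold_inv first rest
    set s := rest.foldl scStep ⟨first.1, first, first, first.1, first, first⟩ with hs
    cases hMX : PySem.List.max? (first :: rest) (fun c => c.1) with
    | none => exact absurd (Iff.mp (PySem.List.max?_eq_none_iff _ _) hMX) (by simp)
    | some m =>
      cases hMN : PySem.List.min? (first :: rest) (fun c => c.1) with
      | none => exact absurd (Iff.mp (PySem.List.min?_eq_none_iff _ _) hMN) (by simp)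
      | some n =>
        have hm1 : m.1 = s.maxx := by
          have h1 : m.1 ≤ s.maxx := hbHi m (PySem.List.max?_mem hMX)
          have hmem := PySem.List.max?_mem hmx
          have h2 := List.mem_filter.mp hmem
          have h2' : s.hiMax.1 = s.maxx := by simpa using h2.2
          have h3 : s.hiMax.1 ≤ m.1 := PySem.List.max?_isMax hMX _ h2.1
          omega
        have hn1 : n.1 = s.minx := by
          have h1 : s.minx ≤ n.1 := hbLo n (PySem.List.min?_mem hMN)
          have hmem := PySem.List.max?_mem hlmx
          have h2 := List.mem_filter.mp hmem
          have h2' : s.loMax.1 = s.minx := by simpa using h2.2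
          have h3 : n.1 ≤ s.loMax.1 := PySem.List.min?_isMin hMN _ h2.1
          omega
        simp only [sort_coordinates, hMX, hMN, hm1, hn1, hmx, hmn, hlmx, hlmn]
        simp [sort_coordinates_alt, ← hs]
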